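-- pv_equiv track=rewrite | github.com/califorliu/COMP3122 | context_optimizer.py | reorder_by_prerequisites
-- ===== SOURCE A (Python) =====
-- from typing import List, Dict
--
-- def reorder_by_prerequisites(chunks: List[Dict]) -> List[Dict]:
--     """
--     Reorder chunks so prerequisites come first.
--
--     Order: description → header → detail
--     Within each level: sort by heading_path (breadth-first traversal)
--
--     Args:
--         chunks: List of chunk dicts
--
--     Returns:
--         Reordered list of chunks
--     """
--     # Group by chunk level
--     by_level = {
--         'description': [],
--         'header': [],
--         'detail': []
--     }
--
--     for chunk in chunks:
--         level = chunk['metadata'].get('chunk_level', 'detail')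
--         if level in by_level:
--             by_level[level].append(chunk)
--
--     # Sort within each level by heading_path
--     for level in by_level:
--         by_level[level].sort(key=lambda x: x['metadata'].get('heading_path', ''))
--
--     # Combine: description → header → detail
--     reordered = []
--     reordered.extend(by_level['description'])
--     reordered.extend(by_level['header'])
--     reordered.extend(by_level['detail'])
--
--     return reordered
-- ===== SOURCE B (Python) =====
-- from typing import List, Dict
--
-- def reorder_by_prerequisites(chunks: List[Dict]) -> List[Dict]:
--     """Single stable sort by a composite (level-rank, heading_path) key."""
--     rank = {'description': 0, 'header': 1, 'detail': 2}
--     filtered = [c for c in chunks if c['metadata'].get('chunk_level', 'detail') in rank]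
--     return sorted(filtered, key=lambda c: (rank[c['metadata'].get('chunk_level', 'detail')],
--                                            c['metadata'].get('heading_path', '')))
-- ===== Notes on version B (the rewrite author's own statement) =====
-- stated objective: simpler
-- what changed: Replaces the three-bucket dict grouping, per-bucket in-place sorts and concatenation by one filter plus a single stable sort on the composite key (level rank, heading_path).
import Mathlib
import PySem

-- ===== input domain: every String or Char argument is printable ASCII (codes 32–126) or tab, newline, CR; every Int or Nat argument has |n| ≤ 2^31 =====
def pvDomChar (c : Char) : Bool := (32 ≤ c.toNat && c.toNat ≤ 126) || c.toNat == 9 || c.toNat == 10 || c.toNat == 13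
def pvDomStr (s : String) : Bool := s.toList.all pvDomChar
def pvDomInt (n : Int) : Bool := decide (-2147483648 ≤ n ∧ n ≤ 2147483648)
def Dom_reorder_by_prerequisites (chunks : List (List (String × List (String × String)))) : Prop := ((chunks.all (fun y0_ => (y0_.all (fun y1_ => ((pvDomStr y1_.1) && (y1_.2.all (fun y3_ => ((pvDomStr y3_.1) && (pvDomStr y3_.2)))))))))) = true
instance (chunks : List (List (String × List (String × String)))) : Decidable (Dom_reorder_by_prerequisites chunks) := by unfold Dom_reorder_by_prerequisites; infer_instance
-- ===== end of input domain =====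

-- B replaces A's three-bucket dict grouping + per-bucket sorts + concatenation by one filter and a
-- single stable composite-key (level rank, heading_path) sort (objective: simpler). A raises
-- KeyError on a chunk without a 'metadata' key; Pre_ excludes exactly those inputs.


-- Shared helpers: both Pythons evaluate these identical expressions on a chunk.
-- chunk['metadata'] — a missing key is a KeyError, excluded by Pre_; the total form defaults to []
def chunkMeta (c : List (String × List (String × String))) : List (String × String) :=
  (PySem.Dict.mk c).getD "metadata" []
-- chunk['metadata'].get('chunk_level', 'detail')
def chunkLevel (c : List (String × List (String × String))) : String :=
  (PySem.Dict.mk (chunkMeta c)).getD "chunk_level" "detail"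
-- x['metadata'].get('heading_path', '')
def chunkPath (c : List (String × List (String × String))) : String :=
  (PySem.Dict.mk (chunkMeta c)).getD "heading_path" ""

-- ===== PORT A =====
def reorder_by_prerequisites (chunks : List (List (String × List (String × String)))) : List (List (String × List (String × String))) :=
  -- by_level = {'description': [], 'header': [], 'detail': []}
  let by_level : PySem.Dict String (List (List (String × List (String × String)))) :=
    PySem.Dict.mk [("description", []), ("header", []), ("detail", [])]
  -- for chunk in chunks: level = …; if level in by_level: by_level[level].append(chunk)
  let by_level := chunks.foldl (fun d chunk =>
    let level := chunkLevel chunk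
    if d.contains level then d.modify level [] (fun l => l ++ [chunk]) else d) by_level
  -- for level in by_level: by_level[level].sort(key=lambda x: x['metadata'].get('heading_path', ''))
  let by_level := by_level.keys.foldl (fun d level =>
    d.modify level [] (fun l => PySem.List.sorted l chunkPath)) by_level
  -- reordered = []; extend with the three buckets in order
  ([] : List (List (String × List (String × String))))
    ++ by_level.getD "description" [] ++ by_level.getD "header" [] ++ by_level.getD "detail" []

-- ===== PORT B =====
-- rank = {'description': 0, 'header': 1, 'detail': 2}
def pvRank : PySem.Dict String Int := PySem.Dict.mk [("description", 0), ("header", 1), ("detail", 2)]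

def reorder_by_prerequisites_alt (chunks : List (List (String × List (String × String)))) : List (List (String × List (String × String))) :=
  -- filtered = [c for c in chunks if c['metadata'].get('chunk_level', 'detail') in rank]
  let filtered := chunks.filter (fun c => pvRank.contains (chunkLevel c))
  -- sorted(filtered, key=lambda c: (rank[…], c['metadata'].get('heading_path', '')))
  PySem.List.sorted2 filtered (fun c => pvRank.getD (chunkLevel c) 0) (fun c => chunkPath c)

-- ===== PRECONDITION & SPEC =====
-- Pre_ excludes exactly the inputs containing a chunk without a 'metadata' key, on which A
-- (and B) raise KeyError.
def Pre_reorder_by_prerequisites (chunks : List (List (String × List (String × String)))) : Prop :=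
  ∀ c ∈ chunks, ((PySem.Dict.mk c).get? "metadata").isSome = true
instance (chunks : List (List (String × List (String × String)))) : Decidable (Pre_reorder_by_prerequisites chunks) := by unfold Pre_reorder_by_prerequisites; infer_instance
def pvWitness_reorder_by_prerequisites : (List (List (String × List (String × String)))) :=
  [[("metadata", [("chunk_level", "header"), ("heading_path", "A")])],
   [("metadata", [("heading_path", "B")])]]

def Spec_reorder_by_prerequisites (chunks : List (List (String × List (String × String)))) (out : List (List (String × List (String × String)))) : Prop := out = reorder_by_prerequisites_alt chunks
instance (chunks : List (List (String × List (String × String)))) (out : List (List (String × List (String × String)))) : Decidable (Spec_reorder_by_prerequisites chunks out) := by unfold Spec_reorder_by_prerequisites; infer_instance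

-- ===== CLAIM (what is proved, stated in full; the proofs are below) =====
def Claim_equal_reorder_by_prerequisites : Prop := ∀ (chunks : List (List (String × List (String × String)))), Dom_reorder_by_prerequisites chunks → Pre_reorder_by_prerequisites chunks → Spec_reorder_by_prerequisites chunks (reorder_by_prerequisites chunks)

-- ===== LEMMAS AND PROOFS =====

-- the sorted per-level bucket both programs are shown to produce
def bucket (k : String) (chunks : List (List (String × List (String × String)))) : List (List (String × List (String × String))) :=
  PySem.List.sorted (chunks.filter (fun c => chunkLevel c == k)) chunkPath

-- A's per-chunk dict-update step, named so the fold invariant can be stated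
def pvStepA (d : PySem.Dict String (List (List (String × List (String × String)))))
    (chunk : List (String × List (String × String))) : PySem.Dict String (List (List (String × List (String × String)))) :=
  let level := chunkLevel chunk
  if d.contains level then d.modify level [] (fun l => l ++ [chunk]) else d

lemma fold_inv (l : List (List (String × List (String × String))))
    (D H T : List (List (String × List (String × String)))) :
    l.foldl pvStepA (PySem.Dict.mk [("description", D), ("header", H), ("detail", T)]) =
      PySem.Dict.mk [("description", D ++ l.filter (fun c => chunkLevel c == "description")),
                     ("header", H ++ l.filter (fun c => chunkLevel c == "header")),
                     ("detail", T ++ l.filter (fun c => chunkLevel c == "detail"))] := by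
  induction l generalizing D H T with
  | nil => simp
  | cons c l ih =>
    by_cases h1 : chunkLevel c = "description"
    · simp [pvStepA, h1, PySem.Dict.contains, PySem.Dict.modify, PySem.Dict.insert,
        PySem.Dict.getD, PySem.Dict.get?, List.find?, ih]
    · by_cases h2 : chunkLevel c = "header"
      · simp [pvStepA, h2, PySem.Dict.contains, PySem.Dict.modify, PySem.Dict.insert,
          PySem.Dict.getD, PySem.Dict.get?, List.find?, ih]
      · by_cases h3 : chunkLevel c = "detail"
        · simp [pvStepA, h3, PySem.Dict.contains, PySem.Dict.modify, PySem.Dict.insert,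
            PySem.Dict.getD, PySem.Dict.get?, List.find?, ih]
        · have d1 : ("description" == chunkLevel c) = false := beq_eq_false_iff_ne.mpr (fun h => h1 h.symm)
          have d2 : ("header" == chunkLevel c) = false := beq_eq_false_iff_ne.mpr (fun h => h2 h.symm)
          have d3 : ("detail" == chunkLevel c) = false := beq_eq_false_iff_ne.mpr (fun h => h3 h.symm)
          simp [pvStepA, PySem.Dict.contains, d1, d2, d3, ih, h1, h2, h3]

lemma a_eq_buckets (chunks : List (List (String × List (String × String)))) :
    reorder_by_prerequisites chunks =
      bucket "description" chunks ++ bucket "header" chunks ++ bucket "detail" chunks := by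
  have hb : (fun (d : PySem.Dict String (List (List (String × List (String × String)))))
      (chunk : List (String × List (String × String))) =>
      let level := chunkLevel chunk
      if d.contains level then d.modify level [] (fun l => l ++ [chunk]) else d) = pvStepA := rfl
  unfold reorder_by_prerequisites
  simp only [hb]
  rw [fold_inv]
  simp [bucket, PySem.Dict.keys, PySem.Dict.modify, PySem.Dict.insert, PySem.Dict.contains,
    PySem.Dict.getD, PySem.Dict.get?]

lemma insertBy_all_before {α : Type} (p : α → α → Bool) (x : α) (bs : List α)
    (h : ∀ b ∈ bs, p x b = true) : PySem.List.insertBy p x bs = x :: bs := by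
  cases bs with
  | nil => rfl
  | cons b bs => simp [PySem.List.insertBy, h b (by simp)]

lemma insertBy_append_left {α : Type} (p : α → α → Bool) (x : α) (as bs : List α)
    (h : ∀ b ∈ bs, p x b = true) :
    PySem.List.insertBy p x (as ++ bs) = PySem.List.insertBy p x as ++ bs := by
  induction as with
  | nil => simpa using insertBy_all_before p x bs h
  | cons a as ih =>
    by_cases hp : p x a = true <;> simp [PySem.List.insertBy, hp, ih]

lemma insertBy_append_right {α : Type} (p : α → α → Bool) (x : α) (as bs : List α)
    (h : ∀ a ∈ as, p x a = false) :
    PySem.List.insertBy p x (as ++ bs) = as ++ PySem.List.insertBy p x bs := by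
  induction as with
  | nil => rfl
  | cons a as ih =>
    simp [PySem.List.insertBy, h a (by simp), ih (fun a ha => h a (by simp [ha]))]

lemma insertBy_congr {α : Type} (p q : α → α → Bool) (x : α) (ys : List α)
    (h : ∀ y ∈ ys, p x y = q x y) :
    PySem.List.insertBy p x ys = PySem.List.insertBy q x ys := by
  induction ys with
  | nil => rfl
  | cons y ys ih =>
    have := h y (by simp)
    by_cases hp : p x y = true <;>
      simp [PySem.List.insertBy, hp, ← this, ih (fun z hz => h z (by simp [hz]))]

lemma mem_bucket_level {k : String} {c : List (String × List (String × String))}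
    {l : List (List (String × List (String × String)))}
    (h : c ∈ bucket k l) : chunkLevel c = k := by
  unfold bucket at h
  rw [PySem.List.mem_sorted] at h
  simpa using (List.of_mem_filter h)

lemma bucket_append_singleton_of_eq (k : String) (l : List (List (String × List (String × String))))
    (c : List (String × List (String × String))) (h : chunkLevel c = k) :
    bucket k (l ++ [c]) =
      PySem.List.insertBy (fun a b => decide (chunkPath a < chunkPath b)) c (bucket k l) := by
  unfold bucket
  rw [List.filter_append, PySem.List.sorted_eq_foldl_insertBy, PySem.List.sorted_eq_foldl_insertBy,
    List.foldl_append]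
  simp [h]

lemma bucket_append_singleton_of_ne (k : String) (l : List (List (String × List (String × String))))
    (c : List (String × List (String × String))) (h : ¬ chunkLevel c = k) :
    bucket k (l ++ [c]) = bucket k l := by
  unfold bucket
  rw [List.filter_append]
  simp [h]

lemma contains_rank (s : String) :
    pvRank.contains s = (s == "description" || s == "header" || s == "detail") := by
  unfold pvRank PySem.Dict.contains
  simp [List.any, Bool.beq_comm, Bool.or_assoc]

-- B's composite comparison, named so the loop lemmas can be stated
def lt2 (a b : List (String × List (String × String))) : Bool :=
  decide (pvRank.getD (chunkLevel a) 0 < pvRank.getD (chunkLevel b) 0) ||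
    !decide (pvRank.getD (chunkLevel b) 0 < pvRank.getD (chunkLevel a) 0) &&
      decide (chunkPath a < chunkPath b)

lemma lt2_lo {c y : List (String × List (String × String))} {k k' : String}
    (hc : chunkLevel c = k) (hy : chunkLevel y = k')
    (h : pvRank.getD k 0 < pvRank.getD k' 0) : lt2 c y = true := by
  simp [lt2, hc, hy, h]

lemma lt2_hi {c y : List (String × List (String × String))} {k k' : String}
    (hc : chunkLevel c = k) (hy : chunkLevel y = k')
    (h : pvRank.getD k' 0 < pvRank.getD k 0) : lt2 c y = false := by
  simp [lt2, hc, hy, h, not_lt_of_gt h]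

lemma lt2_eqrank {c y : List (String × List (String × String))} {k : String}
    (hc : chunkLevel c = k) (hy : chunkLevel y = k) :
    lt2 c y = decide (chunkPath c < chunkPath y) := by
  simp [lt2, hc, hy]

lemma alt_aux (l : List (List (String × List (String × String)))) :
    (l.filter (fun c => pvRank.contains (chunkLevel c))).foldl
        (fun acc x => PySem.List.insertBy lt2 x acc) [] =
      bucket "description" l ++ (bucket "header" l ++ bucket "detail" l) := by
  induction l using List.reverseRecOn with
  | nil => simp [bucket, PySem.List.sorted]
  | append_singleton l c ih =>
    rw [List.filter_append, List.foldl_append]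
    by_cases hc : pvRank.contains (chunkLevel c) = true
    · have hfc : List.filter (fun c => pvRank.contains (chunkLevel c)) [c] = [c] := by
        simp [List.filter, hc]
      rw [hfc, List.foldl_cons, List.foldl_nil, ih]
      rw [contains_rank] at hc
      rcases (by simpa using hc : (chunkLevel c = "description" ∨ chunkLevel c = "header") ∨
        chunkLevel c = "detail") with (h | h) | h
      · rw [insertBy_append_left _ _ _ _ (by
          intro b hb
          rcases List.mem_append.mp hb with hb | hb
          · exact lt2_lo h (mem_bucket_level hb) (by decide)
          · exact lt2_lo h (mem_bucket_level hb) (by decide))]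
        rw [insertBy_congr lt2 (fun a b => decide (chunkPath a < chunkPath b)) c _
          (fun y hy => lt2_eqrank h (mem_bucket_level hy))]
        rw [← bucket_append_singleton_of_eq _ _ _ h,
          bucket_append_singleton_of_ne "header" l c (by simp [h]),
          bucket_append_singleton_of_ne "detail" l c (by simp [h])]
      · rw [insertBy_append_right _ _ _ _ (fun a ha => lt2_hi h (mem_bucket_level ha) (by decide)),
          insertBy_append_left _ _ _ _ (fun b hb => lt2_lo h (mem_bucket_level hb) (by decide)),
          insertBy_congr lt2 (fun a b => decide (chunkPath a < chunkPath b)) c _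
            (fun y hy => lt2_eqrank h (mem_bucket_level hy)),
          ← bucket_append_singleton_of_eq _ _ _ h,
          bucket_append_singleton_of_ne "description" l c (by simp [h]),
          bucket_append_singleton_of_ne "detail" l c (by simp [h])]
      · rw [insertBy_append_right _ _ _ _ (fun a ha => lt2_hi h (mem_bucket_level ha) (by decide)),
          insertBy_append_right _ _ _ _ (fun a ha => lt2_hi h (mem_bucket_level ha) (by decide)),
          insertBy_congr lt2 (fun a b => decide (chunkPath a < chunkPath b)) c _
            (fun y hy => lt2_eqrank h (mem_bucket_level hy)),
          ← bucket_append_singleton_of_eq _ _ _ h,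
          bucket_append_singleton_of_ne "description" l c (by simp [h]),
          bucket_append_singleton_of_ne "header" l c (by simp [h])]
    · have hfc : List.filter (fun c => pvRank.contains (chunkLevel c)) [c] = [] := by
        simp [List.filter, hc]
      rw [hfc, List.foldl_nil, ih]
      rw [contains_rank] at hc
      have h : (¬chunkLevel c = "description" ∧ ¬chunkLevel c = "header") ∧ ¬chunkLevel c = "detail" := by
        simpa using hc
      rw [bucket_append_singleton_of_ne "description" l c h.1.1,
        bucket_append_singleton_of_ne "header" l c h.1.2,
        bucket_append_singleton_of_ne "detail" l c h.2]

lemma alt_eq_buckets (chunks : List (List (String × List (String × String)))) :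
    reorder_by_prerequisites_alt chunks =
      bucket "description" chunks ++ bucket "header" chunks ++ bucket "detail" chunks := by
  have h : reorder_by_prerequisites_alt chunks =
      (chunks.filter (fun c => pvRank.contains (chunkLevel c))).foldl
        (fun acc x => PySem.List.insertBy lt2 x acc) [] := rfl
  rw [h, alt_aux, List.append_assoc]

-- ===== VERDICT (by name: the statement is the Claim_ definition above) =====
theorem reorder_by_prerequisites_spec : Claim_equal_reorder_by_prerequisites := by
  intro chunks _ _
  unfold Spec_reorder_by_prerequisites
  rw [alt_eq_buckets, a_eq_buckets]
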